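-- pv_equiv track=rewrite | github.com/hughisie/agent0-article-pipeline | agent0_gui/settings.py | _apply_prompt_overrides
-- ===== SOURCE A (Python) =====
-- def _apply_prompt_overrides(config: dict, prompts_map: dict) -> dict:
--     updated = dict(prompts_map)
--     for key, value in config.items():
--         if key.startswith("PROMPT_OVERRIDE_"):
--             prompt_key = key.replace("PROMPT_OVERRIDE_", "", 1)
--             if prompt_key in updated and isinstance(value, str):
--                 updated[prompt_key] = value
--     return updated
-- ===== SOURCE B (Python) =====
-- def _apply_prompt_overrides(config: dict, prompts_map: dict) -> dict:
--     return {
--         pk: (config[ck]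
--              if (ck := "PROMPT_OVERRIDE_" + pk) in config and isinstance(config[ck], str)
--              else v)
--         for pk, v in prompts_map.items()
--     }
-- ===== Notes on version B (the rewrite author's own statement) =====
-- stated objective: idiomatic
-- what changed: B replaces A's scan over config (filter by prefix, strip it, test membership, mutate a copy) with a single dict comprehension over prompts_map that reconstructs the candidate key 'PROMPT_OVERRIDE_'+pk and looks it up in config, so the target map drives the traversal and no key stripping or mutation occurs.
import Mathlib
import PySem

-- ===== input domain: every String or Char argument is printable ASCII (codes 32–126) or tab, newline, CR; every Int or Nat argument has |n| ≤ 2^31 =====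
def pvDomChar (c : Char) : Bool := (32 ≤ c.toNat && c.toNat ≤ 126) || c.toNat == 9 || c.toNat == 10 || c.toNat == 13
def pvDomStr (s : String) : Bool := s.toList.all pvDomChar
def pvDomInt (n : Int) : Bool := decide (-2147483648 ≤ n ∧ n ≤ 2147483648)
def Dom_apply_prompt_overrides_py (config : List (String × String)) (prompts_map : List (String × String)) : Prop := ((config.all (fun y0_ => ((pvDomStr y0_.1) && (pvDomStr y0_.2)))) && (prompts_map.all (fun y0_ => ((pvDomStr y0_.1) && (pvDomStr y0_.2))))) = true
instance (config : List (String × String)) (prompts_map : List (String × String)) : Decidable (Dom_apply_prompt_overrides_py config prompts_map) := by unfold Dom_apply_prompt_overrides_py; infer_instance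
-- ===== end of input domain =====

-- ===== PORT A =====
-- Hand port of Python's str.replace(old, new, 1) (count = 1: replace only the LEFTMOST
-- occurrence, scanning left to right) — PySem.Str.replace has no count parameter; exact on all inputs.
def pvReplace1 (s old new : List Char) : List Char :=
  match s with
  | [] => if PySem.Chars.startswith [] old then new else []
  | c :: cs =>
    if PySem.Chars.startswith (c :: cs) old then new ++ (c :: cs).drop old.length
    else c :: pvReplace1 cs old new

-- literal port of A: updated = dict(prompts_map); for key, value in config.items(): ...
-- ('isinstance(value, str)' is always true here: values are String under the type convention)
def apply_prompt_overrides_py (config : List (String × String)) (prompts_map : List (String × String)) : List (String × String) :=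
  let updated : PySem.Dict String String := PySem.Dict.ofList prompts_map
  (config.foldl (fun upd kv =>
    if PySem.Str.startswith kv.1 "PROMPT_OVERRIDE_" then
      let prompt_key : String := String.ofList (pvReplace1 kv.1.toList "PROMPT_OVERRIDE_".toList [])
      if upd.contains prompt_key then upd.insert prompt_key kv.2 else upd
    else upd) updated).items

-- ===== PORT B =====
-- literal port of B: one dict comprehension over prompts_map.items() (the keys pk are the dict's
-- distinct keys in order, i.e. the items of dict(prompts_map), and stay unchanged, so the built
-- dict's items ARE this map); each value looks the candidate key up in config.
def apply_prompt_overrides_py_alt (config : List (String × String)) (prompts_map : List (String × String)) : List (String × String) :=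
  let cfg : PySem.Dict String String := PySem.Dict.ofList config
  (PySem.Dict.ofList prompts_map).items.map (fun pv =>
    let ck : String := "PROMPT_OVERRIDE_" ++ pv.1
    (pv.1, if cfg.contains ck then cfg.getD ck pv.2 else pv.2))


-- ===== PRECONDITION & SPEC =====
def Spec_apply_prompt_overrides_py (config : List (String × String)) (prompts_map : List (String × String)) (out : List (String × String)) : Prop := out = apply_prompt_overrides_py_alt config prompts_map
instance (config : List (String × String)) (prompts_map : List (String × String)) (out : List (String × String)) : Decidable (Spec_apply_prompt_overrides_py config prompts_map out) := by unfold Spec_apply_prompt_overrides_py; infer_instance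

-- ===== CLAIM (what is proved, stated in full; the proofs are below) =====
def Claim_equal_apply_prompt_overrides_py : Prop := ∀ (config : List (String × String)) (prompts_map : List (String × String)), Dom_apply_prompt_overrides_py config prompts_map → Spec_apply_prompt_overrides_py config prompts_map (apply_prompt_overrides_py config prompts_map)

-- ===== LEMMAS AND PROOFS =====

-- the value config leaves at prompt key pk when v is its starting value (last override wins)
def pvOv (cfg : List (String × String)) (pk v : String) : String :=
  cfg.foldl (fun acc kv => if kv.1 = "PROMPT_OVERRIDE_" ++ pk then kv.2 else acc) v

theorem pvReplace1_of_prefix (s old : List Char) (h : old <+: s) :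
    pvReplace1 s old [] = s.drop old.length := by
  cases s with
  | nil =>
    have : old = [] := List.prefix_nil.mp h
    simp [pvReplace1, this]
  | cons c cs =>
    rw [pvReplace1, if_pos ((PySem.Chars.startswith_iff _ _).mpr h)]
    simp

theorem pvKey_eq (k : String) (h : PySem.Str.startswith k "PROMPT_OVERRIDE_" = true) :
    k = "PROMPT_OVERRIDE_" ++ String.ofList (pvReplace1 k.toList "PROMPT_OVERRIDE_".toList []) := by
  have hp : "PROMPT_OVERRIDE_".toList <+: k.toList := by
    have := (PySem.Chars.startswith_iff k.toList "PROMPT_OVERRIDE_".toList).mp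
    simp only [PySem.Str.startswith_eq] at h
    exact this h
  obtain ⟨t, ht⟩ := hp
  have hdrop : pvReplace1 k.toList "PROMPT_OVERRIDE_".toList [] = t := by
    rw [pvReplace1_of_prefix _ _ ⟨t, ht⟩, ← ht, List.drop_left]
  apply String.toList_injective
  rw [String.toList_append, hdrop]
  simp only [String.toList_ofList]
  exact ht.symm

theorem pvStartswith_append (x : String) :
    PySem.Str.startswith ("PROMPT_OVERRIDE_" ++ x) "PROMPT_OVERRIDE_" = true := by
  simp only [PySem.Str.startswith_eq]
  exact (PySem.Chars.startswith_iff _ _).mpr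
    (by rw [String.toList_append]; exact List.prefix_append _ _)

theorem pvAppend_cancel {a b : String} (h : ("PROMPT_OVERRIDE_" : String) ++ a = "PROMPT_OVERRIDE_" ++ b) : a = b := by
  apply String.toList_injective
  have := congrArg String.toList h
  rw [String.toList_append, String.toList_append] at this
  exact List.append_cancel_left this

-- A's loop body, named for the induction (defeq to the lambda in the port: the let zeta-reduces)
def pvStep (upd : PySem.Dict String String) (kv : String × String) : PySem.Dict String String :=
  if PySem.Str.startswith kv.1 "PROMPT_OVERRIDE_" then
    if upd.contains (String.ofList (pvReplace1 kv.1.toList "PROMPT_OVERRIDE_".toList [])) then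
      upd.insert (String.ofList (pvReplace1 kv.1.toList "PROMPT_OVERRIDE_".toList [])) kv.2
    else upd
  else upd

theorem pvStep_nodup (d : PySem.Dict String String) (kv : String × String) (hd : d.keys.Nodup) :
    (pvStep d kv).keys.Nodup := by
  unfold pvStep
  split_ifs <;> first | exact PySem.Dict.nodup_keys_insert _ _ _ hd | exact hd

theorem pvFoldA (cfg : List (String × String)) :
    ∀ (d : PySem.Dict String String), d.keys.Nodup →
      (cfg.foldl pvStep d).items = d.items.map (fun pv => (pv.1, pvOv cfg pv.1 pv.2)) := by
  induction cfg with
  | nil => intro d _; simp [pvOv]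
  | cons kv cfg ih =>
    intro d hd
    rw [List.foldl_cons, ih _ (pvStep_nodup d kv hd)]
    have hOv : ∀ pk v, pvOv (kv :: cfg) pk v
        = pvOv cfg pk (if kv.1 = "PROMPT_OVERRIDE_" ++ pk then kv.2 else v) := by
      intro pk v; rfl
    unfold pvStep
    by_cases hs : PySem.Str.startswith kv.1 "PROMPT_OVERRIDE_" = true
    · rw [if_pos hs]
      set pk : String := String.ofList (pvReplace1 kv.1.toList "PROMPT_OVERRIDE_".toList []) with hpk
      have hk : kv.1 = "PROMPT_OVERRIDE_" ++ pk := pvKey_eq kv.1 hs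
      by_cases hc : d.contains pk = true
      · rw [if_pos hc, PySem.Dict.items_insert_of_contains _ _ hc, List.map_map]
        apply List.map_congr_left
        intro p _
        by_cases hpe : p.1 = pk
        · simp [Function.comp, hpe, hk, hOv]
        · have hne : ¬ kv.1 = "PROMPT_OVERRIDE_" ++ p.1 := by
            rw [hk]; intro hcon; exact hpe (pvAppend_cancel hcon).symm
          simp [Function.comp, hpe, hne, hOv]
      · rw [if_neg hc]
        apply List.map_congr_left
        intro p hp
        have hne1 : p.1 ≠ pk := by
          intro hcon
          apply hc
          rw [PySem.Dict.contains_iff_mem_keys, ← hcon]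
          exact PySem.Dict.mem_keys_of_mem_items _ hp
        have hne : ¬ kv.1 = "PROMPT_OVERRIDE_" ++ p.1 := by
          rw [hk]; intro hcon; exact hne1 (pvAppend_cancel hcon).symm
        rw [hOv, if_neg hne]
    · rw [if_neg hs]
      apply List.map_congr_left
      intro p _
      have hne : ¬ kv.1 = "PROMPT_OVERRIDE_" ++ p.1 := by
        intro hcon; rw [hcon] at hs; exact hs (pvStartswith_append p.1)
      rw [hOv, if_neg hne]

theorem pvGetFold (cfg : List (String × String)) :
    ∀ (d : PySem.Dict String String) (k : String),
      (cfg.foldl (fun d kv => d.insert kv.1 kv.2) d).get? k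
        = cfg.foldl (fun acc kv => if kv.1 = k then some kv.2 else acc) (d.get? k) := by
  induction cfg with
  | nil => intro d k; rfl
  | cons kv cfg ih =>
    intro d k
    rw [List.foldl_cons, ih, List.foldl_cons, PySem.Dict.get?_insert]
    by_cases h : kv.1 = k
    · simp [h]
    · simp [h, Ne.symm h]

theorem pvOptFold (cfg : List (String × String)) :
    ∀ (k : String) (o : Option String) (v : String),
      (cfg.foldl (fun acc kv => if kv.1 = k then some kv.2 else acc) o).getD v
        = cfg.foldl (fun acc kv => if kv.1 = k then kv.2 else acc) (o.getD v) := by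
  induction cfg with
  | nil => intro k o v; rfl
  | cons kv cfg ih =>
    intro k o v
    rw [List.foldl_cons, List.foldl_cons, ih]
    by_cases h : kv.1 = k <;> simp [h]

theorem pvLookup (cfg : List (String × String)) (k v : String) :
    (if (PySem.Dict.ofList cfg).contains k then (PySem.Dict.ofList cfg).getD k v else v)
      = cfg.foldl (fun acc kv => if kv.1 = k then kv.2 else acc) v := by
  have hof : PySem.Dict.ofList cfg
      = cfg.foldl (fun d kv => d.insert kv.1 kv.2) PySem.Dict.empty := rfl
  rw [hof, PySem.Dict.contains_eq_isSome_get?, PySem.Dict.getD_eq_get?_getD, pvGetFold]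
  have h2 := pvOptFold cfg k (PySem.Dict.get? PySem.Dict.empty k) v
  rw [PySem.Dict.get?_empty] at h2
  simp only [Option.getD_none] at h2
  rw [PySem.Dict.get?_empty]
  cases hres : cfg.foldl (fun acc kv => if kv.1 = k then some kv.2 else acc) none with
  | none => rw [hres] at h2; simpa using h2
  | some w => rw [hres] at h2; simpa using h2

-- ===== VERDICT (by name: the statement is the Claim_ definition above) =====
theorem apply_prompt_overrides_py_spec : Claim_equal_apply_prompt_overrides_py := by
  intro config prompts_map _
  show apply_prompt_overrides_py config prompts_map = apply_prompt_overrides_py_alt config prompts_map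
  have hA : apply_prompt_overrides_py config prompts_map
      = (config.foldl pvStep (PySem.Dict.ofList prompts_map)).items := rfl
  have hB : apply_prompt_overrides_py_alt config prompts_map
      = (PySem.Dict.ofList prompts_map).items.map (fun pv =>
          (pv.1, if (PySem.Dict.ofList config).contains ("PROMPT_OVERRIDE_" ++ pv.1) then
                   (PySem.Dict.ofList config).getD ("PROMPT_OVERRIDE_" ++ pv.1) pv.2
                 else pv.2)) := rfl
  rw [hA, hB, pvFoldA config _ (PySem.Dict.nodup_keys_ofList prompts_map)]
  apply List.map_congr_left
  intro pv _
  rw [pvLookup]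
  rfl
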